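-- pv_equiv track=rewrite | github.com/marketcockpit999-eng/Market-Cockpit-Pro | utils/display_checker.py | _parse_args_string
-- ===== SOURCE A (Python) =====
-- from typing import Dict, List, Tuple, Optional, Any
--
-- def _parse_args_string(args_str: str) -> Dict[str, str]:
--     """
--     Parse function arguments string into a dictionary.
--
--     Handles:
--     - Positional args: stored as pos_0, pos_1, ...
--     - Keyword args: stored by name
--
--     Example:
--         "label, series, 'KEY', explanation_key=''"
--         -> {'pos_0': 'label', 'pos_1': 'series', 'pos_2': "'KEY'",
--             'explanation_key': "''"}
--     """
--     result = {}
--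
--     # Split by comma, but be careful with nested parentheses and strings
--     args = _smart_split(args_str)
--
--     pos_idx = 0
--     for arg in args:
--         arg = arg.strip()
--         if not arg:
--             continue
--
--         # Check if keyword argument (contains '=')
--         if '=' in arg and not arg.startswith("'") and not arg.startswith('"'):
--             # Handle keyword argument
--             parts = arg.split('=', 1)
--             if len(parts) == 2:
--                 key = parts[0].strip()
--                 value = parts[1].strip()
--                 result[key] = value
--         else:
--             # Positional argument
--             result[f'pos_{pos_idx}'] = arg
--             pos_idx += 1
--
--     return result
--
-- def _smart_split(s: str) -> List[str]:
--     """
--     Split string by comma, respecting parentheses and quotes.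
--     """
--     result = []
--     current = []
--     depth = 0
--     in_string = None
--
--     for char in s:
--         if char in '"\'' and in_string is None:
--             in_string = char
--             current.append(char)
--         elif char == in_string:
--             in_string = None
--             current.append(char)
--         elif in_string:
--             current.append(char)
--         elif char == '(':
--             depth += 1
--             current.append(char)
--         elif char == ')':
--             depth -= 1
--             current.append(char)
--         elif char == ',' and depth == 0:
--             result.append(''.join(current))
--             current = []
--         else:
--             current.append(char)
--
--     if current:
--         result.append(''.join(current))
--
--     return result
-- ===== SOURCE B (Python) =====
-- def _first_break(s):
--     """Index of the first top-level comma in s, or len(s) if none.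
--
--     Cursor scanner: quoted sections are skipped in one jump with str.find
--     (no per-character in-string state); parens tracked by a counter that
--     may go negative."""
--     depth = 0
--     i = 0
--     n = len(s)
--     while i < n:
--         c = s[i]
--         if c in '\'"':
--             j = s.find(c, i + 1)
--             if j == -1:
--                 return n
--             i = j + 1
--         elif c == '(':
--             depth += 1
--             i += 1
--         elif c == ')':
--             depth -= 1
--             i += 1
--         elif c == ',' and depth == 0:
--             return i
--         else:
--             i += 1
--     return n
--
-- def _emit(result, tok, pos_idx):
--     tok = tok.strip()
--     if not tok:
--         return pos_idx
--     if '=' in tok and tok[0] not in '\'"':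
--         key, value = tok.split('=', 1)
--         result[key.strip()] = value.strip()
--         return pos_idx
--     result[f'pos_{pos_idx}'] = tok
--     return pos_idx + 1
--
-- def _parse_args_string(args_str):
--     result = {}
--     pos_idx = 0
--     rest = args_str
--     while True:
--         k = _first_break(rest)
--         pos_idx = _emit(result, rest[:k], pos_idx)
--         if k >= len(rest):
--             return result
--         rest = rest[k + 1:]
-- ===== Notes on version B (the rewrite author's own statement) =====
-- stated objective: alternative
-- what changed: A runs a per-character state machine (depth, in_string, growing char buffer) that materializes all top-level-comma tokens and then classifies them in a second loop; B is a cursor/jump scanner: a helper finds the index of the first top-level comma, skipping whole quoted sections in one str.find jump (no in-string state, no char buffer), the token is cut out as a slice and classified immediately, and the loop restarts on the remaining suffix.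
import Mathlib
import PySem

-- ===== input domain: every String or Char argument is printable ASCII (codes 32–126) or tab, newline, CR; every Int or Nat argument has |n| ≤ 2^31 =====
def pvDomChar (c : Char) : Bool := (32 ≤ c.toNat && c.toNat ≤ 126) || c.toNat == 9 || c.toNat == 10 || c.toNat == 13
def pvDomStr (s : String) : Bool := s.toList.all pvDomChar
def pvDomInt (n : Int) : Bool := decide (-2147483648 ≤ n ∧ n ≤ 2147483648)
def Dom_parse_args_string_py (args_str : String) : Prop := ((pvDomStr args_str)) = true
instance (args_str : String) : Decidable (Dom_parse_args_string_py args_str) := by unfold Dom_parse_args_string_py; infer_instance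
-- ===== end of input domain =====

-- A is a per-character state machine that first materializes the top-level-comma token
-- list and then classifies it; B is a cursor/jump scanner that locates each top-level
-- comma (skipping quoted sections with one find-jump, no in-string state), slices the
-- token out and classifies it at once (objective: alternative).

-- ===== PORT A =====
-- one step of _smart_split's character loop; ''.join(current) is String.ofList (current is a list of chars)
def pvSmartStep (st : List String × List Char × Int × Option Char) (c : Char) :
    List String × List Char × Int × Option Char :=
  match st with
  | (res, cur, depth, ins) =>
    if (c == '"' || c == '\'') && ins == none then (res, cur ++ [c], depth, some c)
    else if some c == ins then (res, cur ++ [c], depth, none)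
    else if ins.isSome then (res, cur ++ [c], depth, ins)
    else if c == '(' then (res, cur ++ [c], depth + 1, ins)
    else if c == ')' then (res, cur ++ [c], depth - 1, ins)
    else if c == ',' && depth == 0 then (res ++ [String.ofList cur], [], depth, ins)
    else (res, cur ++ [c], depth, ins)

def pvSmartSplit (s : String) : List String :=
  match s.toList.foldl pvSmartStep ([], [], 0, none) with
  | (res, cur, _, _) => if cur == [] then res else res ++ [String.ofList cur]

-- body of A's `for arg in args` loop, state = (result, pos_idx)
def pvClassifyA (st : PySem.Dict String String × Int) (arg0 : String) :
    PySem.Dict String String × Int :=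
  let arg := PySem.Str.strip arg0
  if arg == "" then st
  else if PySem.Str.isIn "=" arg && !(PySem.Str.startswith arg "'")
          && !(PySem.Str.startswith arg "\"") then
    match PySem.Str.splitMax? arg "=" 1 with
    | some parts =>
      if parts.length == 2 then
        (st.1.insert (PySem.Str.strip (parts.getD 0 "")) (PySem.Str.strip (parts.getD 1 "")), st.2)
      else st
    | none => st
  else (st.1.insert ("pos_" ++ PySem.Int.toStr st.2) arg, st.2 + 1)

def parse_args_string_py (args_str : String) : List (String × String) :=
  ((pvSmartSplit args_str).foldl pvClassifyA (PySem.Dict.empty, 0)).1.items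

-- ===== PORT B =====
-- s.find(c, start) for a single character c: hand port (PySem.Str.find has no start
-- offset); exact — first index ≥ start holding c, none for Python's -1.
def pvFindFrom (cs : List Char) (q : Char) (start : Nat) : Option Nat :=
  ((cs.drop start).findIdx? (· == q)).map (start + ·)

theorem pvFindFrom_ge (cs : List Char) (q : Char) (start j : Nat)
    (h : pvFindFrom cs q start = some j) : start ≤ j := by
  unfold pvFindFrom at h
  cases hf : ((cs.drop start).findIdx? (· == q)) with
  | none => rw [hf] at h; simp at h
  | some k => rw [hf] at h; simp at h; omega

-- _first_break's while loop: cursor i, paren depth; quotes skipped by one find-jump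
def pvFirstBreakGo (cs : List Char) (i : Nat) (depth : Int) : Nat :=
  if h : i < cs.length then
    let c := cs[i]
    if c = '\'' ∨ c = '"' then
      match hf : pvFindFrom cs c (i + 1) with
      | none => cs.length
      | some j => pvFirstBreakGo cs (j + 1) depth
    else if c = '(' then pvFirstBreakGo cs (i + 1) (depth + 1)
    else if c = ')' then pvFirstBreakGo cs (i + 1) (depth - 1)
    else if c = ',' ∧ depth = 0 then i
    else pvFirstBreakGo cs (i + 1) depth
  else cs.length
termination_by cs.length - i
decreasing_by
  · have := pvFindFrom_ge cs _ (i + 1) j hf; omega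
  · omega
  · omega
  · omega

-- _emit: strip the token, skip if empty, else keyword (split on first '=') or positional
def pvEmit (result : PySem.Dict String String) (tok0 : String) (pos_idx : Int) :
    PySem.Dict String String × Int :=
  let tok := PySem.Str.strip tok0
  if tok == "" then (result, pos_idx)
  else
    let c := tok.toList.headD ' '   -- tok[0]; tok is nonempty here
    if PySem.Str.isIn "=" tok && !(c == '\'' || c == '"') then
      match PySem.Str.splitMax? tok "=" 1 with
      | some [key, value] =>
        (result.insert (PySem.Str.strip key) (PySem.Str.strip value), pos_idx)
      | _ => (result, pos_idx)   -- unreachable: the guarded split yields exactly two parts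
    else (result.insert ("pos_" ++ PySem.Int.toStr pos_idx) tok, pos_idx + 1)

-- _parse_args_string's while-True loop over the remaining suffix `rest`
def pvParseGo (rest : List Char) (result : PySem.Dict String String) (pos_idx : Int) :
    PySem.Dict String String :=
  let k := pvFirstBreakGo rest 0 0
  let st := pvEmit result (String.ofList (rest.take k)) pos_idx
  if h : k < rest.length then pvParseGo (rest.drop (k + 1)) st.1 st.2
  else st.1
termination_by rest.length
decreasing_by simp; omega

def parse_args_string_py_alt (args_str : String) : List (String × String) :=
  (pvParseGo args_str.toList PySem.Dict.empty 0).items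

-- ===== PRECONDITION & SPEC =====
def Spec_parse_args_string_py (args_str : String) (out : List (String × String)) : Prop := out = parse_args_string_py_alt args_str
instance (args_str : String) (out : List (String × String)) : Decidable (Spec_parse_args_string_py args_str out) := by unfold Spec_parse_args_string_py; infer_instance

-- ===== CLAIM (what is proved, stated in full; the proofs are below) =====
def Claim_equal_parse_args_string_py : Prop := ∀ (args_str : String), Dom_parse_args_string_py args_str → Spec_parse_args_string_py args_str (parse_args_string_py args_str)

-- ===== LEMMAS AND PROOFS =====

-- list-level specification of the first top-level break position
def pvFbL : List Char → Int → Nat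
  | [], _ => 0
  | c :: cs, d =>
    if c = '\'' ∨ c = '"' then
      match cs.findIdx? (· == c) with
      | none => 1 + cs.length
      | some j => (j + 2) + pvFbL (cs.drop (j + 1)) d
    else if c = '(' then 1 + pvFbL cs (d + 1)
    else if c = ')' then 1 + pvFbL cs (d - 1)
    else if c = ',' ∧ d = 0 then 0
    else 1 + pvFbL cs d
termination_by cs _ => cs.length
decreasing_by all_goals simp [List.length_drop] <;> omega

-- the token list both pipelines produce (trailing buffer always included)
def pvTokens : List Char → List Char → Int → List (List Char)
  | [], cur, _ => [cur]
  | c :: cs, cur, d =>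
    if c = '\'' ∨ c = '"' then
      match cs.findIdx? (· == c) with
      | none => [cur ++ c :: cs]
      | some j => pvTokens (cs.drop (j + 1)) (cur ++ [c] ++ cs.take (j + 1)) d
    else if c = '(' then pvTokens cs (cur ++ [c]) (d + 1)
    else if c = ')' then pvTokens cs (cur ++ [c]) (d - 1)
    else if c = ',' ∧ d = 0 then cur :: pvTokens cs [] d
    else pvTokens cs (cur ++ [c]) d
termination_by cs _ _ => cs.length
decreasing_by all_goals simp [List.length_drop] <;> omega

theorem pv_startswith_head (s : String) (hc : s ≠ "") (q : Char) :
    PySem.Str.startswith s (String.ofList [q]) = (s.toList.headD ' ' == q) := by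
  have h : s.toList ≠ [] := by
    intro hn; apply hc; rw [← String.toList_inj]; simpa using hn
  cases hs : s.toList with
  | nil => exact absurd hs h
  | cons a t =>
    simp [PySem.Str.startswith, PySem.Chars.startswith, hs, List.isPrefixOf, BEq.comm]

theorem pvEmit_eq_classify (d : PySem.Dict String String) (tok : String) (pos : Int) :
    pvEmit d tok pos = pvClassifyA (d, pos) tok := by
  unfold pvEmit pvClassifyA
  dsimp only
  generalize PySem.Str.strip tok = s
  by_cases h0 : s = ""
  · simp [h0]
  · have h0' : (s == "") = false := by simpa using h0
    have h1 := pv_startswith_head s h0 '\''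
    have h2 := pv_startswith_head s h0 '"'
    have e1 : ("'" : String) = String.ofList ['\''] := rfl
    have e2 : ("\"" : String) = String.ofList ['"'] := rfl
    rw [h0', e1, e2, h1, h2]
    have hcond : (PySem.Str.isIn "=" s && !(s.toList.headD ' ' == '\'' || s.toList.headD ' ' == '"'))
        = (PySem.Str.isIn "=" s && !(s.toList.headD ' ' == '\'') && !(s.toList.headD ' ' == '"')) := by
      cases PySem.Str.isIn "=" s <;> cases s.toList.headD ' ' == '\'' <;> cases s.toList.headD ' ' == '"' <;> rfl
    rw [hcond]
    simp only [Bool.false_eq_true, if_false]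
    by_cases hb : (PySem.Str.isIn "=" s && !(s.toList.headD ' ' == '\'') && !(s.toList.headD ' ' == '"')) = true
    · rw [if_pos hb, if_pos hb]
      cases hp : PySem.Str.splitMax? s "=" 1 with
      | none => rfl
      | some parts =>
        match parts with
        | [] => rfl
        | [a] => rfl
        | [a, b] => rfl
        | a :: b :: c :: r => rfl
    · rw [if_neg hb, if_neg hb]

theorem pvClassifyA_empty (st : PySem.Dict String String × Int) :
    pvClassifyA st "" = st := rfl

-- skipping a quoted stretch: the fold in state `some q` runs to the closing quote
theorem pvFold_quote (cs : List Char) (res : List String) (cur : List Char) (d : Int)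
    (q : Char) :
    cs.foldl pvSmartStep (res, cur, d, some q)
      = match cs.findIdx? (· == q) with
        | none => (res, cur ++ cs, d, some q)
        | some j => (cs.drop (j + 1)).foldl pvSmartStep (res, cur ++ cs.take (j + 1), d, none) := by
  induction cs generalizing cur with
  | nil => simp
  | cons c cs ih =>
    rw [List.foldl_cons, List.findIdx?_cons]
    by_cases hc : c = q
    · subst hc
      have hstep : pvSmartStep (res, cur, d, some c) c = (res, cur ++ [c], d, none) := by
        unfold pvSmartStep; simp
      simp [hstep]
    · have hcq : (c == q) = false := by simpa using hc
      have hstep : pvSmartStep (res, cur, d, some q) c = (res, cur ++ [c], d, some q) := by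
        unfold pvSmartStep
        have h1 : ((c == '"' || c == '\'') && ((some q : Option Char) == none)) = false := by simp
        have h2 : ((some c : Option Char) == some q) = false := by simp [hc]
        simp [h2]
      rw [hstep, ih (cur ++ [c])]
      cases hf : cs.findIdx? (· == q) with
      | none => simp [hcq]
      | some j => simp [hcq, List.take_succ_cons]

-- A's char fold (with the final buffer appended unconditionally) produces pvTokens
theorem pvFold_tokens (n : Nat) (cs : List Char) (hn : cs.length ≤ n)
    (res : List String) (cur : List Char) (d : Int) :
    (cs.foldl pvSmartStep (res, cur, d, none)).1
        ++ [String.ofList (cs.foldl pvSmartStep (res, cur, d, none)).2.1]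
      = res ++ (pvTokens cs cur d).map String.ofList := by
  induction n generalizing cs res cur d with
  | zero =>
    have : cs = [] := List.length_eq_zero_iff.mp (Nat.le_zero.mp hn)
    subst this; simp [pvTokens]
  | succ n ih =>
    cases cs with
    | nil => simp [pvTokens]
    | cons c cs' =>
      simp only [List.length_cons, Nat.add_le_add_iff_right] at hn
      rw [List.foldl_cons]
      by_cases hq : c = '\'' ∨ c = '"'
      · have hstep : pvSmartStep (res, cur, d, none) c = (res, cur ++ [c], d, some c) := by
          unfold pvSmartStep; rcases hq with h | h <;> subst h <;> simp
        rw [hstep, pvFold_quote, pvTokens, if_pos hq]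
        cases hf : cs'.findIdx? (· == c) with
        | none => dsimp only; simp
        | some j =>
          dsimp only
          have hrest : (cs'.drop (j + 1)).length ≤ n := by
            rw [List.length_drop]; omega
          rw [ih _ hrest res _ d]
      · have hq1 : (c == '"') = false := by
          rcases Decidable.em (c = '"') with h | h
          · exact absurd (Or.inr h) hq
          · simpa using h
        have hq2 : (c == '\'') = false := by
          rcases Decidable.em (c = '\'') with h | h
          · exact absurd (Or.inl h) hq
          · simpa using h
        by_cases hp : c = '('
        · have hstep : pvSmartStep (res, cur, d, none) c = (res, cur ++ [c], d + 1, none) := by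
            unfold pvSmartStep; subst hp; simp
          rw [hstep, pvTokens, if_neg hq, if_pos hp, ih cs' hn res _ (d + 1)]
        · by_cases hr : c = ')'
          · have hstep : pvSmartStep (res, cur, d, none) c = (res, cur ++ [c], d - 1, none) := by
              unfold pvSmartStep; subst hr; simp
            rw [hstep, pvTokens, if_neg hq, if_neg hp, if_pos hr, ih cs' hn res _ (d - 1)]
          · by_cases hk : c = ',' ∧ d = 0
            · have hstep : pvSmartStep (res, cur, d, none) c
                  = (res ++ [String.ofList cur], [], d, none) := by
                unfold pvSmartStep; obtain ⟨h1, h2⟩ := hk; subst h1; subst h2; simp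
              rw [hstep, pvTokens, if_neg hq, if_neg hp, if_neg hr, if_pos hk,
                  ih cs' hn (res ++ [String.ofList cur]) _ d]
              simp
            · have hstep : pvSmartStep (res, cur, d, none) c = (res, cur ++ [c], d, none) := by
                unfold pvSmartStep
                have hcomma : (c == ',' && d == 0) = false := by
                  rcases Decidable.em (c = ',') with h | h
                  · have : ¬ d = 0 := fun hd => hk ⟨h, hd⟩
                    simp [this]
                  · simp [h]
                simp [hq1, hq2, hp, hr, hcomma]
              rw [hstep, pvTokens, if_neg hq, if_neg hp, if_neg hr, if_neg hk, ih cs' hn res _ d]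

-- pushing one buffered char through the head-token characterization
theorem pvShift (cs' : List Char) (cur : List Char) (c : Char) (d2 : Int) :
    ((cur ++ [c]) ++ cs'.take (pvFbL cs' d2))
        :: (if pvFbL cs' d2 < cs'.length then pvTokens (cs'.drop (pvFbL cs' d2 + 1)) [] 0 else [])
    = (cur ++ (c :: cs').take (1 + pvFbL cs' d2))
        :: (if 1 + pvFbL cs' d2 < (c :: cs').length
            then pvTokens ((c :: cs').drop (1 + pvFbL cs' d2 + 1)) [] 0 else []) := by
  have h1 : 1 + pvFbL cs' d2 = pvFbL cs' d2 + 1 := by omega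
  simp only [h1, List.take_succ_cons, List.length_cons, List.drop_succ_cons,
    Nat.add_lt_add_iff_right]
  simp

-- the first token of pvTokens is the take at pvFbL; the rest restarts after the comma
theorem pvTokens_fb (n : Nat) (cs : List Char) (hn : cs.length ≤ n) (cur : List Char) (d : Int) :
    pvTokens cs cur d
      = (cur ++ cs.take (pvFbL cs d))
          :: (if pvFbL cs d < cs.length then pvTokens (cs.drop (pvFbL cs d + 1)) [] 0 else []) := by
  induction n generalizing cs cur d with
  | zero =>
    have : cs = [] := List.length_eq_zero_iff.mp (Nat.le_zero.mp hn)
    subst this; simp [pvTokens, pvFbL]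
  | succ n ih =>
    cases cs with
    | nil => simp [pvTokens, pvFbL]
    | cons c cs' =>
      simp only [List.length_cons, Nat.add_le_add_iff_right] at hn
      rw [pvTokens, pvFbL]
      by_cases hq : c = '\'' ∨ c = '"'
      · rw [if_pos hq, if_pos hq]
        cases hf : cs'.findIdx? (· == c) with
        | none =>
          dsimp only
          have hno : ¬ (1 + cs'.length < (c :: cs').length) := by
            simp only [List.length_cons]; omega
          rw [if_neg hno]
          have : (c :: cs').take (1 + cs'.length) = c :: cs' := by
            apply List.take_of_length_le; simp only [List.length_cons]; omega
          rw [this]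
        | some j =>
          dsimp only
          have hjlt : j < cs'.length := (List.findIdx?_eq_some_iff_findIdx_eq.mp hf).1
          have hrest : (cs'.drop (j + 1)).length ≤ n := by
            rw [List.length_drop]; omega
          rw [ih _ hrest _ d]
          have hcond : (pvFbL (cs'.drop (j + 1)) d < (cs'.drop (j + 1)).length)
              = ((j + 2) + pvFbL (cs'.drop (j + 1)) d < (c :: cs').length) := by
            rw [List.length_drop]; simp only [List.length_cons, eq_iff_iff]
            omega
          have htake : (cur ++ [c] ++ cs'.take (j + 1)) ++ (cs'.drop (j + 1)).take (pvFbL (cs'.drop (j + 1)) d)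
              = cur ++ (c :: cs').take ((j + 2) + pvFbL (cs'.drop (j + 1)) d) := by
            have e : (j + 2) + pvFbL (cs'.drop (j + 1)) d
                = ((j + 1) + pvFbL (cs'.drop (j + 1)) d) + 1 := by omega
            have hta : cs'.take ((j + 1) + pvFbL (cs'.drop (j + 1)) d)
                = cs'.take (j + 1) ++ (cs'.drop (j + 1)).take (pvFbL (cs'.drop (j + 1)) d) :=
              List.take_add
            rw [e, List.take_succ_cons, hta]
            simp
          have hdrop : (cs'.drop (j + 1)).drop (pvFbL (cs'.drop (j + 1)) d + 1)
              = (c :: cs').drop ((j + 2) + pvFbL (cs'.drop (j + 1)) d + 1) := by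
            have e : (j + 2) + pvFbL (cs'.drop (j + 1)) d + 1
                = ((j + 1) + pvFbL (cs'.drop (j + 1)) d + 1) + 1 := by omega
            rw [e, List.drop_succ_cons, List.drop_drop]
            congr 1 <;> omega
          rw [htake]
          simp only [hcond]
          all_goals rw [hdrop]
      · rw [if_neg hq, if_neg hq]
        by_cases hp : c = '('
        · rw [if_pos hp, if_pos hp, ih cs' hn _ (d + 1)]
          exact pvShift cs' cur c (d + 1)
        · rw [if_neg hp, if_neg hp]
          by_cases hr : c = ')'
          · rw [if_pos hr, if_pos hr, ih cs' hn _ (d - 1)]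
            exact pvShift cs' cur c (d - 1)
          · rw [if_neg hr, if_neg hr]
            by_cases hk : c = ',' ∧ d = 0
            · rw [if_pos hk, if_pos hk]
              have h0 : (0 : Nat) < (c :: cs').length := by simp
              rw [if_pos h0]
              obtain ⟨hc1, hd0⟩ := hk
              subst hd0
              simp
            · rw [if_neg hk, if_neg hk, ih cs' hn _ d]
              exact pvShift cs' cur c d

-- the cursor scanner computes the list-level break position
theorem pvFirstBreakGo_eq (n : Nat) (cs : List Char) (i : Nat) (d : Int)
    (hn : cs.length - i ≤ n) (hi : i ≤ cs.length) :
    pvFirstBreakGo cs i d = i + pvFbL (cs.drop i) d := by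
  induction n generalizing i d with
  | zero =>
    have hie : i = cs.length := by omega
    rw [pvFirstBreakGo]
    rw [dif_neg (by omega)]
    have : cs.drop i = [] := List.drop_eq_nil_of_le (by omega)
    rw [this, pvFbL]
    omega
  | succ n ih =>
    by_cases hlt : i < cs.length
    · have hdrop : cs.drop i = cs[i] :: cs.drop (i + 1) := List.drop_eq_getElem_cons hlt
      rw [pvFirstBreakGo, dif_pos hlt, hdrop, pvFbL]
      by_cases hq : cs[i] = '\'' ∨ cs[i] = '"'
      · rw [if_pos hq, if_pos hq]
        cases hfi : (cs.drop (i + 1)).findIdx? (· == cs[i]) with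
        | none =>
          have hff : pvFindFrom cs cs[i] (i + 1) = none := by
            unfold pvFindFrom; rw [hfi]; rfl
          dsimp only
          split
          · rename_i heq
            rw [hff] at heq; cases heq
            rw [List.length_drop]; omega
          · rename_i j heq
            rw [hff] at heq; cases heq
        | some k =>
          have hklt : k < (cs.drop (i + 1)).length :=
            (List.findIdx?_eq_some_iff_findIdx_eq.mp hfi).1
          rw [List.length_drop] at hklt
          have hff : pvFindFrom cs cs[i] (i + 1) = some ((i + 1) + k) := by
            unfold pvFindFrom; rw [hfi]; rfl
          dsimp only
          split
          · rename_i heq; rw [hff] at heq; cases heq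
          · rename_i j heq
            rw [hff] at heq
            have hj : j = (i + 1) + k := by cases heq; rfl
            subst hj
            rw [ih ((i + 1) + k + 1) d (by omega) (by omega)]
            have hdd : cs.drop ((i + 1) + k + 1) = (cs.drop (i + 1)).drop (k + 1) := by
              rw [List.drop_drop]; congr 1 <;> omega
            rw [hdd]
            omega
      · rw [if_neg hq, if_neg hq]
        by_cases hp : cs[i] = '('
        · rw [if_pos hp, if_pos hp, ih (i + 1) (d + 1) (by omega) (by omega)]
          omega
        · rw [if_neg hp, if_neg hp]
          by_cases hr : cs[i] = ')'
          · rw [if_pos hr, if_pos hr, ih (i + 1) (d - 1) (by omega) (by omega)]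
            omega
          · rw [if_neg hr, if_neg hr]
            by_cases hk : cs[i] = ',' ∧ d = 0
            · rw [if_pos hk, if_pos hk]
              omega
            · rw [if_neg hk, if_neg hk, ih (i + 1) d (by omega) (by omega)]
              omega
    · rw [pvFirstBreakGo, dif_neg hlt]
      have : cs.drop i = [] := List.drop_eq_nil_of_le (by omega)
      rw [this, pvFbL]
      omega

-- fuse B's loop with the classification fold over the token list
set_option maxHeartbeats 1600000 in
theorem pvParseGo_eq (n : Nat) (cs : List Char) (hn : cs.length ≤ n)
    (result : PySem.Dict String String) (pos : Int) :
    pvParseGo cs result pos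
      = (((pvTokens cs [] 0).map String.ofList).foldl pvClassifyA (result, pos)).1 := by
  induction n generalizing cs result pos with
  | zero =>
    have : cs = [] := List.length_eq_zero_iff.mp (Nat.le_zero.mp hn)
    subst this
    rw [pvParseGo]
    rw [pvFirstBreakGo_eq 0 [] 0 0 (by simp) (by simp)]
    simp only [List.drop_nil, pvFbL, List.take_nil, List.length_nil]
    rw [dif_neg (by omega)]
    rw [pvTokens]
    simp only [List.map_cons, List.map_nil, List.foldl_cons, List.foldl_nil]
    rw [show String.ofList [] = "" from rfl, pvClassifyA_empty]
    rw [pvEmit_eq_classify, pvClassifyA_empty]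
  | succ n ih =>
    rw [pvParseGo]
    rw [pvFirstBreakGo_eq cs.length cs 0 0 (by omega) (by omega), List.drop_zero]
    simp only [Nat.zero_add]
    rw [pvTokens_fb cs.length cs le_rfl [] 0, List.nil_append]
    by_cases hlt : pvFbL cs 0 < cs.length
    · rw [dif_pos hlt, if_pos hlt]
      simp only [List.map_cons, List.foldl_cons]
      rw [pvEmit_eq_classify]
      exact ih (cs.drop (pvFbL cs 0 + 1)) (by rw [List.length_drop]; omega)
        (pvClassifyA (result, pos) (String.ofList (cs.take (pvFbL cs 0)))).1
        (pvClassifyA (result, pos) (String.ofList (cs.take (pvFbL cs 0)))).2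
    · rw [dif_neg hlt, if_neg hlt]
      simp only [List.map_cons, List.map_nil, List.foldl_cons, List.foldl_nil]
      rw [pvEmit_eq_classify]

-- A's split (which drops a trailing empty buffer) classifies like the full token list
theorem pvSmart_classify (s : String) (acc : PySem.Dict String String × Int) :
    (pvSmartSplit s).foldl pvClassifyA acc
      = ((pvTokens s.toList [] 0).map String.ofList).foldl pvClassifyA acc := by
  have h := pvFold_tokens s.toList.length s.toList le_rfl [] [] 0
  simp only [List.nil_append] at h
  unfold pvSmartSplit
  rcases hfold : s.toList.foldl pvSmartStep ([], [], 0, none) with ⟨r, c, d', q'⟩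
  rw [hfold] at h
  dsimp only at h ⊢
  by_cases hc : c = []
  · subst hc
    rw [← h]
    simp only [beq_self_eq_true, if_pos]
    rw [List.foldl_append]
    simp only [List.foldl_cons, List.foldl_nil]
    rw [show String.ofList [] = "" from rfl, pvClassifyA_empty]
  · have hc' : (c == []) = false := by simpa using hc
    rw [hc', ← h]
    simp

-- ===== VERDICT (by name: the statement is the Claim_ definition above) =====
theorem parse_args_string_py_spec : Claim_equal_parse_args_string_py := by
  intro s _
  unfold Spec_parse_args_string_py parse_args_string_py parse_args_string_py_alt
  rw [pvParseGo_eq s.toList.length s.toList le_rfl PySem.Dict.empty 0, pvSmart_classify]
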